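-- pv_equiv track=rewrite | github.com/kmlin0928/mahjong16-go | mahjong.py | _find_suit_pairs
-- ===== SOURCE A (Python) =====
-- COPIES = 4              # 每張牌的副本數
--
-- def _find_suit_pairs(s: list[int]) -> list[int]:
--     """Theorem 2：利用牌面 mod 3 分組，快速找出數牌中可能的將牌候選索引。
--
--     參考：arXiv:1707.07345 Theorem 2
--
--     Args:
--         s: 已排序、同一花色的牌號子列表
--
--     Returns:
--         候選對子的起始索引列表（相對於 s）
--     """
--     bins: list[list[int]] = [[], [], []]
--     for i, tile in enumerate(s):
--         bins[(tile // COPIES) % 3].append(i)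
--
--     counts = [len(b) for b in bins]
--     # 找 mod 3 餘數不同的那組，將牌必在其中
--     if counts[0] % 3 != counts[1] % 3:
--         target = 0 if counts[0] % 3 != counts[2] % 3 else 1
--     else:
--         target = 2
--     return bins[target]
-- ===== SOURCE B (Python) =====
-- COPIES = 4              # 每張牌的副本數
--
-- def _find_suit_pairs(s: list[int]) -> list[int]:
--     # Stable sort of (index, tile) pairs by residue class: the three residue
--     # classes become contiguous blocks, indices ascending inside each block,
--     # so the answer is one contiguous slice of the sorted order.
--     pairs = sorted(enumerate(s), key=lambda p: (p[1] // COPIES) % 3)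
--     res = [(t // COPIES) % 3 for _, t in pairs]
--     c0, c1, c2 = res.count(0), res.count(1), res.count(2)
--     if c0 % 3 != c1 % 3:
--         target = 0 if c0 % 3 != c2 % 3 else 1
--     else:
--         target = 2
--     start = (0, c0, c0 + c1)[target]
--     stop = start + (c0, c1, c2)[target]
--     return [i for i, _ in pairs[start:stop]]
-- ===== Notes on version B (the rewrite author's own statement) =====
-- stated objective: alternative
-- what changed: B stably sorts the (index, tile) pairs by residue class so each class becomes one contiguous block with ascending indices, then returns the slice of the sorted order belonging to the chosen class, instead of A's bucketing of indices into three lists.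
import Mathlib
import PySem

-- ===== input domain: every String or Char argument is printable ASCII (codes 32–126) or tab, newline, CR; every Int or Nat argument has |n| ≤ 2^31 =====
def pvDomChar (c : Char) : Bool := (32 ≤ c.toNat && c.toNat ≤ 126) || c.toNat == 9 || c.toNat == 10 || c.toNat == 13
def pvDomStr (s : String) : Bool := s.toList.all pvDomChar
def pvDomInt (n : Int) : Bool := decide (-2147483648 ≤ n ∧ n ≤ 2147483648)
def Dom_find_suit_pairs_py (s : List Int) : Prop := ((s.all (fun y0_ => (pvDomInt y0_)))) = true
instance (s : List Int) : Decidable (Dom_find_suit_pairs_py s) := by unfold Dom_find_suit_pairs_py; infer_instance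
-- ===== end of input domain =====

-- One honest line: B replaces A's three-way index bucketing by a stable sort of the
-- (index, tile) pairs on residue class followed by slicing out the chosen block;
-- a different algorithm of similar cost (objective: alternative).

-- ===== PORT A =====
-- (tile // COPIES) % 3 with COPIES = 4, Python floor division / modulo
def fspRes (tile : Int) : Int := PySem.Int.mod (PySem.Int.floordiv tile 4) 3

-- the loop body: bins[(tile//4)%3].append(i), bins as a triple of lists
def fspA_step (b : List Int × List Int × List Int) (p : Int × Int) :
    List Int × List Int × List Int :=
  if fspRes p.2 = 0 then (b.1 ++ [p.1], b.2.1, b.2.2)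
  else if fspRes p.2 = 1 then (b.1, b.2.1 ++ [p.1], b.2.2)
  else (b.1, b.2.1, b.2.2 ++ [p.1])

def find_suit_pairs_py (s : List Int) : List Int :=
  let bins := (PySem.List.enumerate s).foldl fspA_step ([], [], [])
  let c0 : Int := bins.1.length
  let c1 : Int := bins.2.1.length
  let c2 : Int := bins.2.2.length
  let target : Int :=
    if PySem.Int.mod c0 3 ≠ PySem.Int.mod c1 3 then
      (if PySem.Int.mod c0 3 ≠ PySem.Int.mod c2 3 then 0 else 1)
    else 2
  if target = 0 then bins.1 else if target = 1 then bins.2.1 else bins.2.2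

-- ===== PORT B =====
def find_suit_pairs_py_alt (s : List Int) : List Int :=
  -- pairs = sorted(enumerate(s), key=lambda p: (p[1] // COPIES) % 3)  (stable)
  let pairs := PySem.List.sorted (PySem.List.enumerate s) (fun p => fspRes p.2)
  -- res = [(t // COPIES) % 3 for _, t in pairs]
  let res := pairs.map (fun p => fspRes p.2)
  let c0 : Int := (PySem.List.count res 0 : Int)
  let c1 : Int := (PySem.List.count res 1 : Int)
  let c2 : Int := (PySem.List.count res 2 : Int)
  let target : Int :=
    if PySem.Int.mod c0 3 ≠ PySem.Int.mod c1 3 then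
      (if PySem.Int.mod c0 3 ≠ PySem.Int.mod c2 3 then 0 else 1)
    else 2
  let start : Int := if target = 0 then 0 else if target = 1 then c0 else c0 + c1
  let stop : Int := start + (if target = 0 then c0 else if target = 1 then c1 else c2)
  (PySem.List.slice pairs (some start) (some stop)).map (fun p => p.1)

-- ===== PRECONDITION & SPEC =====
def Spec_find_suit_pairs_py (s : List Int) (out : List Int) : Prop := out = find_suit_pairs_py_alt s
instance (s : List Int) (out : List Int) : Decidable (Spec_find_suit_pairs_py s out) := by unfold Spec_find_suit_pairs_py; infer_instance

-- ===== CLAIM (what is proved, stated in full; the proofs are below) =====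
def Claim_equal_find_suit_pairs_py : Prop := ∀ (s : List Int), Dom_find_suit_pairs_py s → Spec_find_suit_pairs_py s (find_suit_pairs_py s)

-- ===== LEMMAS AND PROOFS =====

-- the enumerated pairs (starting at n) whose tile has residue t
def fspFilt (t : Int) (s : List Int) (n : Int) : List (Int × Int) :=
  (PySem.List.enumerate s n).filter (fun p => decide (fspRes p.2 = t))

theorem fspRes_cases (tile : Int) : fspRes tile = 0 ∨ fspRes tile = 1 ∨ fspRes tile = 2 := by
  have h : fspRes tile = PySem.Int.floordiv tile 4 % 3 := by
    simp [fspRes]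
  have h0 : 0 ≤ PySem.Int.floordiv tile 4 % 3 := Int.emod_nonneg _ (by norm_num)
  have h1 : PySem.Int.floordiv tile 4 % 3 < 3 := Int.emod_lt_of_pos _ (by norm_num)
  omega

theorem fspA_fold (s : List Int) (n : Int) (b : List Int × List Int × List Int) :
    (PySem.List.enumerate s n).foldl fspA_step b =
      (b.1 ++ (fspFilt 0 s n).map (·.1),
       b.2.1 ++ (fspFilt 1 s n).map (·.1),
       b.2.2 ++ (fspFilt 2 s n).map (·.1)) := by
  induction s generalizing n b with
  | nil => simp [PySem.List.enumerate_nil, fspFilt]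
  | cons x xs ih =>
    rcases fspRes_cases x with h | h | h <;>
      simp [PySem.List.enumerate_cons, fspFilt, fspA_step, h, ih, List.append_assoc]

-- grouping form of the three residue classes
def fspGroup (s : List Int) : List (Int × Int) :=
  fspFilt 0 s 0 ++ fspFilt 1 s 0 ++ fspFilt 2 s 0

theorem fspFilt_res_eq (t : Int) (s : List Int) (n : Int) :
    ∀ p ∈ fspFilt t s n, fspRes p.2 = t := by
  intro p hp
  have := List.of_mem_filter hp
  simpa using this

-- stable insertion: an element with residue k lands after everything ≤ k and before everything > k
theorem fsp_insertBy_middle (x : Int × Int) (L M : List (Int × Int))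
    (hL : ∀ y ∈ L, fspRes y.2 ≤ fspRes x.2) (hM : ∀ y ∈ M, fspRes x.2 < fspRes y.2) :
    PySem.List.insertBy (fun a b => decide (fspRes a.2 < fspRes b.2)) x (L ++ M) =
      L ++ x :: M := by
  induction L with
  | nil =>
    cases M with
    | nil => simp [PySem.List.insertBy]
    | cons m ms =>
      have := hM m (by simp)
      simp [PySem.List.insertBy, this]
  | cons y L' ihL =>
    have hy : ¬ fspRes x.2 < fspRes y.2 := by
      have := hL y (by simp)
      omega
    simp only [List.cons_append, PySem.List.insertBy, decide_eq_true_eq, if_neg hy]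
    have := ihL (fun z hz => hL z (by simp [hz]))
    simp [this]

-- the stable sort groups the three residue classes in order
theorem fsp_sorted_eq_group (s : List Int) :
    PySem.List.sorted (PySem.List.enumerate s) (fun p => fspRes p.2) = fspGroup s := by
  rw [PySem.List.sorted_eq_foldl_insertBy]
  -- generalize over the already-inserted prefix
  suffices h : ∀ (xs acc0 acc1 acc2 : List (Int × Int)),
      (∀ y ∈ acc0, fspRes y.2 = 0) → (∀ y ∈ acc1, fspRes y.2 = 1) →
      (∀ y ∈ acc2, fspRes y.2 = 2) →
      xs.foldl (fun acc x =>
          PySem.List.insertBy (fun a b => decide (fspRes a.2 < fspRes b.2)) x acc)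
        (acc0 ++ acc1 ++ acc2) =
      (acc0 ++ (xs.filter (fun p => decide (fspRes p.2 = 0)))) ++
      (acc1 ++ (xs.filter (fun p => decide (fspRes p.2 = 1)))) ++
      (acc2 ++ (xs.filter (fun p => decide (fspRes p.2 = 2)))) by
    have := h (PySem.List.enumerate s) [] [] [] (by simp) (by simp) (by simp)
    simpa [fspGroup, fspFilt] using this
  intro xs
  induction xs with
  | nil => intro acc0 acc1 acc2 _ _ _; simp
  | cons x xs ih =>
    intro acc0 acc1 acc2 h0 h1 h2
    rcases fspRes_cases x.2 with h | h | h
    · have hins : PySem.List.insertBy (fun a b => decide (fspRes a.2 < fspRes b.2)) x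
          (acc0 ++ acc1 ++ acc2) = (acc0 ++ [x]) ++ acc1 ++ acc2 := by
        rw [List.append_assoc]
        rw [fsp_insertBy_middle x acc0 (acc1 ++ acc2)
          (fun y hy => by have := h0 y hy; omega)
          (fun y hy => by
            rcases List.mem_append.mp hy with hy' | hy'
            · have := h1 y hy'; omega
            · have := h2 y hy'; omega)]
        simp
      simp only [List.foldl_cons, hins]
      rw [ih (acc0 ++ [x]) acc1 acc2
        (by intro y hy; rcases List.mem_append.mp hy with hy' | hy'
            · exact h0 y hy'
            · simp at hy'; subst hy'; exact h)
        h1 h2]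
      simp [h, List.append_assoc]
    · have hins : PySem.List.insertBy (fun a b => decide (fspRes a.2 < fspRes b.2)) x
          (acc0 ++ acc1 ++ acc2) = acc0 ++ (acc1 ++ [x]) ++ acc2 := by
        rw [List.append_assoc, List.append_assoc]
        rw [show acc1 ++ acc2 = acc1 ++ acc2 from rfl]
        rw [← List.append_assoc acc0 acc1 acc2]
        rw [fsp_insertBy_middle x (acc0 ++ acc1) acc2
          (fun y hy => by
            rcases List.mem_append.mp hy with hy' | hy'
            · have := h0 y hy'; omega
            · have := h1 y hy'; omega)
          (fun y hy => by have := h2 y hy; omega)]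
        simp [h, List.append_assoc]
      simp only [List.foldl_cons, hins]
      rw [ih acc0 (acc1 ++ [x]) acc2 h0
        (by intro y hy; rcases List.mem_append.mp hy with hy' | hy'
            · exact h1 y hy'
            · simp at hy'; subst hy'; exact h)
        h2]
      simp [h, List.append_assoc]
    · have hins : PySem.List.insertBy (fun a b => decide (fspRes a.2 < fspRes b.2)) x
          (acc0 ++ acc1 ++ acc2) = acc0 ++ acc1 ++ (acc2 ++ [x]) := by
        have := fsp_insertBy_middle x (acc0 ++ acc1 ++ acc2) []
          (fun y hy => by
            rcases List.mem_append.mp hy with hy' | hy'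
            · rcases List.mem_append.mp hy' with hy'' | hy''
              · have := h0 y hy''; omega
              · have := h1 y hy''; omega
            · have := h2 y hy'; omega)
          (fun y hy => by simp at hy)
        simpa [List.append_assoc] using this
      simp only [List.foldl_cons, hins]
      rw [ih acc0 acc1 (acc2 ++ [x]) h0 h1
        (by intro y hy; rcases List.mem_append.mp hy with hy' | hy'
            · exact h2 y hy'
            · simp at hy'; subst hy'; exact h)]
      simp [h, List.append_assoc]

-- counting residue t in the residue list of the grouped pairs gives the block length
theorem fsp_count_map (t j : Int) (s : List Int) :
    List.count t ((fspFilt j s 0).map (fun p => fspRes p.2)) =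
      if j = t then (fspFilt j s 0).length else 0 := by
  by_cases h : j = t
  · subst h
    rw [if_pos rfl]
    rw [List.count_eq_length.mpr]
    · simp
    · intro b hb
      rcases List.mem_map.mp hb with ⟨p, hp, hpe⟩
      rw [← hpe]
      exact (fspFilt_res_eq j s 0 p hp).symm
  · rw [if_neg h]
    rw [List.count_eq_zero.mpr]
    intro hc
    rcases List.mem_map.mp hc with ⟨p, hp, hpe⟩
    exact h ((fspFilt_res_eq j s 0 p hp).symm.trans hpe)

theorem fsp_count_group (t : Int) (s : List Int) (ht : t = 0 ∨ t = 1 ∨ t = 2) :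
    List.count t ((fspGroup s).map (fun p => fspRes p.2)) = (fspFilt t s 0).length := by
  simp only [fspGroup, List.map_append, List.count_append, fsp_count_map]
  rcases ht with h | h | h <;> subst h <;> norm_num

theorem fsp_slice0 (s : List Int) :
    List.map (fun x => x.1)
        (PySem.List.slice (fspGroup s) (some 0)
          (some ((0 : Int) + ((fspFilt 0 s 0).length : Int)))) =
      List.map (fun x => x.1) (fspFilt 0 s 0) := by
  rw [show ((0 : Int) + ((fspFilt 0 s 0).length : Int)) =
      (((0 : Nat) : Int) + (((fspFilt 0 s 0).length : Nat) : Int)) from by norm_num,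
    show (some (0 : Int)) = some (((0 : Nat) : Int)) from by norm_num,
    PySem.List.slice_natCast_add]
  simp [fspGroup, List.take_left']

theorem fsp_slice1 (s : List Int) :
    List.map (fun x => x.1)
        (PySem.List.slice (fspGroup s) (some ((fspFilt 0 s 0).length : Int))
          (some (((fspFilt 0 s 0).length : Int) + ((fspFilt 1 s 0).length : Int)))) =
      List.map (fun x => x.1) (fspFilt 1 s 0) := by
  rw [PySem.List.slice_natCast_add]
  rw [fspGroup, List.append_assoc, List.drop_left]
  simp [List.take_left']

theorem fsp_slice2 (s : List Int) :
    List.map (fun x => x.1)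
        (PySem.List.slice (fspGroup s)
          (some (((fspFilt 0 s 0).length : Int) + ((fspFilt 1 s 0).length : Int)))
          (some ((((fspFilt 0 s 0).length : Int) + ((fspFilt 1 s 0).length : Int)) +
            ((fspFilt 2 s 0).length : Int)))) =
      List.map (fun x => x.1) (fspFilt 2 s 0) := by
  rw [show (((fspFilt 0 s 0).length : Int) + ((fspFilt 1 s 0).length : Int)) =
      ((((fspFilt 0 s 0).length + (fspFilt 1 s 0).length : Nat)) : Int) from by push_cast; ring,
    PySem.List.slice_natCast_add]
  rw [fspGroup,
    show (fspFilt 0 s 0).length + (fspFilt 1 s 0).length =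
      (fspFilt 0 s 0 ++ fspFilt 1 s 0).length from by simp,
    List.drop_left]
  simp

theorem find_suit_pairs_py_eq_alt (s : List Int) :
    find_suit_pairs_py s = find_suit_pairs_py_alt s := by
  unfold find_suit_pairs_py find_suit_pairs_py_alt
  rw [show (PySem.List.enumerate s) = PySem.List.enumerate s 0 from rfl,
    fspA_fold, fsp_sorted_eq_group]
  simp only [List.nil_append, List.length_map, PySem.List.count_eq,
    fsp_count_group 0 s (by norm_num), fsp_count_group 1 s (by norm_num),
    fsp_count_group 2 s (by norm_num)]
  split_ifs <;>
    first
      | omega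
      | exact (fsp_slice0 s).symm
      | exact (fsp_slice1 s).symm
      | exact (fsp_slice2 s).symm

-- ===== VERDICT (by name: the statement is the Claim_ definition above) =====
theorem find_suit_pairs_py_spec : Claim_equal_find_suit_pairs_py := by
  intro s _
  exact find_suit_pairs_py_eq_alt s
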